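/- GENERATED by mk_final_copies.py from the proof of the farm's unit `start_decoder.8` (farm:start_decoder.8.1: Lemmas.lean) as the
   re-elaboration sweep compiled it — do not edit. -/
/-
  Pure lemmas of unit `start_decoder.8` (no machine walk here): the memory-dependent part `Mid8` of the assertions `At8` / `At9` /
  `AtERR`, and its transport `Mid8.step` over one stretch of the segment — a batch of stores all of whose spans lie in the own
  stack below `R + 8`, in the spill slot `[R + 24H, R + 28H)`, or in a window of `*f` that the packet readers write.
-/
import Asan.CheckWalk
import Vorbis.Spec.Units.start_decoder_8
import Vorbis.Spec.StartDecoderATest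

open X86 X86.User Asan Vorbis Vorbis.Spec Vorbis.Spec.StartDecoder

set_option maxRecDepth 4000
set_option maxHeartbeats 1000000

namespace Vorbis.Spec.start_decoder_8

/-- **Where a span of a stretch's footprint may lie**: the own stack below `R + 8` (pushed return addresses, the callees'
frames), the spill slot `[R + 24H, R + 28H)` of `len`, or one of the six windows of `*f` that get8_packet / next_segment / skip /
error write (`Reader.winsPacket`; `error`'s `[140, 144)` lies inside `[136, 144)`). -/
def Allowed (g : Ghost) (s : Span) : Prop :=
  (g.RA - 1888 ≤ s.lo ∧ s.hi ≤ g.R + 8) ∨ (g.R + 0x24 ≤ s.lo ∧ s.hi ≤ g.R + 0x28) ∨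
  (g.f + 48 ≤ s.lo ∧ s.hi ≤ g.f + 56) ∨ (g.f + 84 ≤ s.lo ∧ s.hi ≤ g.f + 96) ∨
  (g.f + 136 ≤ s.lo ∧ s.hi ≤ g.f + 144) ∨ (g.f + 1484 ≤ s.lo ∧ s.hi ≤ g.f + 1749) ∨
  (g.f + 1752 ≤ s.lo ∧ s.hi ≤ g.f + 1764) ∨ (g.f + 1768 ≤ s.lo ∧ s.hi ≤ g.f + 1784)

/-- **The geometry of one activation**: the steady stack pointer, the stack region, and where `*f` is (a stack object of a
CALLER's frame, above the return-address slot, or off the stack region). -/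
structure Geo (g : Ghost) : Prop where
  r : g.R + 1480 = g.RA
  room : 0x700000 + 1888 ≤ g.RA
  top : g.RA + 8 ≤ 0x800000
  al : g.RA % 8 = 0
  obj : g.RA + 8 ≤ g.f ∨ g.f + 1808 ≤ 0x700000 ∨ 0x800000 ≤ g.f

/-- The geometry, from the common part of a cut point and the hand-over carrier. -/
theorem geo_of {u₀ : State} {g : Ghost} {pc : Word} {A : Arena × List Obj} {v : State} (hfr : Frame u₀ g pc A v)
    (hh : g.Hand A) : Geo g := by
  obtain ⟨h1, h2, h3⟩ := hfr.ra
  obtain ⟨h4, _⟩ := hfr.r_eq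
  simp only [depth, steady] at h2 h4
  refine ⟨h4, h2, h3, h1, ?_⟩
  obtain ⟨o, ho, k1, k2⟩ := hh.obj
  simp only [voff] at k2
  rcases List.mem_append.mp ho with hs | hoth
  · unfold stackObjs at hs
    obtain ⟨bF, hbF, hin⟩ := List.mem_flatMap.mp hs
    have hbF' : bF ∈ g.frames' := List.mem_cons_of_mem _ hbF
    obtain ⟨j1, j2, _, _, _⟩ := hfr.shadow.stack.active bF hbF'
    have hg := FrameLayout.objsAt_gran j1 j2 hin
    have hc := hfr.callers bF hbF
    have e : o.gLo = o.base / 8 := rfl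
    left
    omega
  · have := hfr.shadow.off o hoth
    unfold OffStack at this
    omega

/-- The seven slots above the protected frame: the caller's callee-saved registers and the return address. -/
structure Slots (g : Ghost) (mem : Mem) : Prop where
  rbx : mem.u64 (g.R + 0x598) = (g.e.reg .rbx).toNat
  rbp : mem.u64 (g.R + 0x5a0) = (g.e.reg .rbp).toNat
  r12 : mem.u64 (g.R + 0x5a8) = (g.e.reg .r12).toNat
  r13 : mem.u64 (g.R + 0x5b0) = (g.e.reg .r13).toNat
  r14 : mem.u64 (g.R + 0x5b8) = (g.e.reg .r14).toNat
  r15 : mem.u64 (g.R + 0x5c0) = (g.e.reg .r15).toNat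
  ra : mem.u64 (g.R + 0x5c8) = g.ret.toNat

/-- **The memory-dependent part of the segment's assertions** (what `Body8`, `Body9`, `BodyERR` say about the memory, minus Z24,
`bytes_in_seg` and the result): `SDw 1`, CM1 – CM3 over the arena's blocks, the shadow layer with the frame poisoned, SH7 for
`log2_4`, the function's footprint so far, the seven saved slots. -/
structure Mid8 (g : Ghost) (A : Arena × List Obj) (mem : Mem) : Prop where
  sd : SDw g.len 1 A (g.Blk A) (g.Live A) mem g.f g.R
  cm : CommentsOK A.1.Blk mem g.f
  shadow : ShadowInv A.2 g.frames' g.R mem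
  sh7 : Log2_4In mem
  same : Mem.SameExcept (footprint g) g.e.mem mem
  slots : Slots g mem

/-- The entry assertion gives `Mid8`. -/
theorem Mid8.of_body {u₀ : State} {g : Ghost} {A : Arena × List Obj} {v : State} (h : Body8 u₀ g A v) : Mid8 g A v.mem :=
  { sd := h.sd
    cm := h.comment
    shadow := h.frame.shadow
    sh7 := h.frame.sh7
    same := h.frame.same
    slots := ⟨h.frame.saved_rbx, h.frame.saved_rbp, h.frame.saved_r12, h.frame.saved_r13, h.frame.saved_r14,
      h.frame.saved_r15, h.frame.saved_ra⟩ }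

/-- The part of `*f` that no reader writes: the complement of the six windows of `Allowed`. -/
def keptWins8 : Wins := [(0, 48), (56, 84), (96, 136), (144, 1484), (1749, 1752), (1764, 1768), (1784, 1808)]

/-- **One stretch of the segment** (up to a callee's return, or a store of the segment's own): every span of the stretch's
footprint is `Allowed`, and `Bits` holds again (the callee's post, or a store lemma of Vorbis/Bits.lean) ⇒ `Mid8` holds again. -/
theorem Mid8.step {g : Ghost} {A : Arena × List Obj} {mem mem' : Mem} {spans : List Span} (h : Mid8 g A mem) (hgeo : Geo g)
    (hh : g.Hand A) (hs : Mem.SameExcept spans mem mem') (hal : ∀ s, s ∈ spans → Allowed g s)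
    (hb : Bits (g.Blk A) g.len mem' g.f) : Mid8 g A mem' := by
  obtain ⟨hr, hroom, htop, hal8, hobj⟩ := hgeo
  have hobr := h.sd.bits.OBR
  simp only [voff] at hobr
  -- a region that misses the stack part and the six windows reads the same
  have key : ∀ lo hi, (hi ≤ g.RA - 1888 ∨ g.R + 0x28 ≤ lo ∨ (g.R + 8 ≤ lo ∧ hi ≤ g.R + 0x24)) →
      (hi ≤ g.f + 48 ∨ g.f + 1784 ≤ lo ∨ (g.f + 56 ≤ lo ∧ hi ≤ g.f + 84) ∨ (g.f + 96 ≤ lo ∧ hi ≤ g.f + 136) ∨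
        (g.f + 144 ≤ lo ∧ hi ≤ g.f + 1484) ∨ (g.f + 1749 ≤ lo ∧ hi ≤ g.f + 1752) ∨
        (g.f + 1764 ≤ lo ∧ hi ≤ g.f + 1768)) → Mem.EqOn lo hi mem mem' := by
    intro lo hi h1 h2
    apply hs.eqOn
    intro w hw
    have ha := hal w hw
    unfold Allowed at ha
    rcases ha with a | a | a | a | a | a | a | a <;> omega
  -- a region inside `*f`: the stack part misses it
  have keyf : ∀ lo hi, g.f ≤ lo → hi ≤ g.f + 1808 →
      (hi ≤ g.f + 48 ∨ g.f + 1784 ≤ lo ∨ (g.f + 56 ≤ lo ∧ hi ≤ g.f + 84) ∨ (g.f + 96 ≤ lo ∧ hi ≤ g.f + 136) ∨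
        (g.f + 144 ≤ lo ∧ hi ≤ g.f + 1484) ∨ (g.f + 1749 ≤ lo ∧ hi ≤ g.f + 1752) ∨
        (g.f + 1764 ≤ lo ∧ hi ≤ g.f + 1768)) → Mem.EqOn lo hi mem mem' := by
    intro lo hi h1 h2 h3
    exact key lo hi (by omega) h3
  have hsh : Mem.EqOn 0xC00000 0xE00000 mem mem' := key _ _ (by omega) (by omega)
  have hoe : ObjEq keptWins8 mem g.f mem' g.f := by
    apply ObjEq.of_eqOn
    · intro w hw
      simp only [keptWins8, List.mem_cons, List.mem_nil_iff, or_false] at hw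
      rcases hw with rfl | rfl | rfl | rfl | rfl | rfl | rfl <;> simp only [] <;> omega
    · intro w hw
      simp only [keptWins8, List.mem_cons, List.mem_nil_iff, or_false] at hw
      rcases hw with rfl | rfl | rfl | rfl | rfl | rfl | rfl <;> exact keyf _ _ (by omega) (by omega) (by omega)
  have hc : Mem.EqOn (g.R + 8) (g.R + 0x24) mem mem' := key _ _ (by omega) (by omega)
  have hsl : Mem.EqOn (g.R + 0x598) (g.RA + 8) mem mem' := key _ _ (by omega) (by omega)
  have harena := h.sd.arena
  refine ⟨⟨?env, ?frame, ?arena, h.sd.setups, hb, ?first, ?disc, ?header, ?cb0, ?rest⟩, ?cm, ?shadow, ?sh7, ?same, ?slots⟩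
  case env => exact h.sd.env.eqOn hsh
  case frame =>
    obtain ⟨c1, c2, c3, c4, _⟩ := h.sd.frame
    refine ⟨c1, ?_, ?_, ?_, ?_⟩
    · rw [hc.u64 (g.R + 8) (by omega) (by omega) (by omega)]
      exact c2
    · rw [hc.u32 (g.R + 0x20) (by omega) (by omega) (by omega)]
      exact c3
    · intro hk
      rw [hc.u8 (g.R + 0x10) (by omega) (by omega) (by omega)]
      exact c4 hk
    · intro h2 _
      exact absurd h2 (by omega)
  case arena => exact harena.transfer (hoe.sub (by decide))
  case first =>
    have e := h.sd.first
    simp only [vacc, voff] at e ⊢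
    rw [hoe.u8 1749 (by decide)]
    exact e
  case disc =>
    have e := h.sd.discard0
    simp only [vacc, voff] at e ⊢
    rw [hoe.i32 1784 (by decide)]
    exact e
  case header =>
    intro h1
    exact (h.sd.header h1).transfer (hoe.sub (by decide))
  case cb0 =>
    intro h3
    exact absurd h3 (by omega)
  case rest =>
    have e := h.sd.rest
    have er : restFrom 1 = 160 := by decide
    rw [er] at e ⊢
    unfold RestZero at e ⊢
    simp only [voff] at e ⊢
    exact e.frame (keyf _ _ (by omega) (by omega) (by omega)) (by omega)
  case cm =>
    refine h.cm.transfer (hoe.sub (by decide)) ?_ (fun _ _ hB => hB)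
    intro B hR
    have hB : A.1.Blk B := h.cm.reads_blk hR
    obtain ⟨i1, i2⟩ := arena_inside harena hB
    have i3 := harena.blk_off_stack hB
    have i4 := hh.objOut
    have i5 := harena.AR1
    simp only [voff] at i4
    apply Block.Kept.of_sameExcept hs
    · intro w hw
      have ha := hal w hw
      unfold Allowed at ha
      rcases ha with a | a | a | a | a | a | a | a <;> omega
    · omega
  case shadow => exact h.shadow.untouched hsh
  case sh7 =>
    intro i hi
    have e : Vorbis.Globals.log2_4.beg = 0x120640 := rfl
    rw [e]
    have he : Mem.EqOn 0x120640 0x120650 mem mem' := key _ _ (by omega) (by omega)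
    have ea : (UInt64.ofNat (0x120640 + i)).toNat = 0x120640 + i := toNat_addr _ (by omega)
    rw [he.readLE _ 1 (by omega) (by omega) (by omega)]
    have := h.sh7 i hi
    rw [e] at this
    exact this
  case same =>
    apply h.same.step_same hs
    intro w hw a a1 a2
    have ha := hal w hw
    unfold Allowed at ha
    unfold footprint writes
    have ef : (g.e.reg .rdi).toNat = g.f := rfl
    rcases ha with b | b | b | b | b | b | b | b
    · exact ⟨_, List.mem_cons_self, by simp only [depth]; omega, by simp only []; omega⟩
    · exact ⟨_, List.mem_cons_self, by simp only [depth]; omega, by simp only []; omega⟩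
    all_goals
      refine ⟨_, List.mem_cons_of_mem _ List.mem_cons_self, ?_, ?_⟩
      · simp only [vblock, ef]
        omega
      · simp only [vblock, ef, voff]
        omega
  case slots =>
    obtain ⟨s1, s2, s3, s4, s5, s6, s7⟩ := h.slots
    refine ⟨?_, ?_, ?_, ?_, ?_, ?_, ?_⟩
    · rw [hsl.u64 _ (by omega) (by omega) (by omega)]
      exact s1
    · rw [hsl.u64 _ (by omega) (by omega) (by omega)]
      exact s2
    · rw [hsl.u64 _ (by omega) (by omega) (by omega)]
      exact s3
    · rw [hsl.u64 _ (by omega) (by omega) (by omega)]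
      exact s4
    · rw [hsl.u64 _ (by omega) (by omega) (by omega)]
      exact s5
    · rw [hsl.u64 _ (by omega) (by omega) (by omega)]
      exact s6
    · rw [hsl.u64 _ (by omega) (by omega) (by omega)]
      exact s7

/-- **The common part `Frame` at an exit**, from the entry's (the memory-independent fields), `Mid8` at the exit state, and the
walker's facts about the exit state. -/
theorem frame_of {u₀ : State} {g : Ghost} {pc : Word} {A : Arena × List Obj} {v w : State} (hfr : Frame u₀ g pc_8 A v)
    (hm : Mid8 g A w.mem) (hrip : w.rip = pc) (hrsp : w.reg .rsp = addr g.R) (hcode : CodeOK u₀ w.mem) (hinv : abiInv w) :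
    Frame u₀ g pc A w :=
  { entry := hfr.entry
    rip := hrip
    rsp := hrsp
    shadowIdx := hm.sd.frame.shadowIdx
    saved_rbx := hm.slots.rbx
    saved_rbp := hm.slots.rbp
    saved_r12 := hm.slots.r12
    saved_r13 := hm.slots.r13
    saved_r14 := hm.slots.r14
    saved_r15 := hm.slots.r15
    saved_ra := hm.slots.ra
    code := hcode
    inv := hinv
    shadow := hm.shadow
    offText := hfr.offText
    ext := hfr.ext
    callers := hfr.callers
    sh7 := hm.sh7
    same := hm.same }

/-- **The exit `At9`** (0x114184): `Mid8`, Z24 (the do-while left `len = 0` in dword `[R + 24H]`), `bytes_in_seg = 0`. -/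
theorem at9_of {u₀ : State} {g : Ghost} {A : Arena × List Obj} {v w : State} (hfr : Frame u₀ g pc_8 A v) (hh : g.Hand A)
    (hno : A.1.temps = []) (hm : Mid8 g A w.mem) (hrip : w.rip = pc_9) (hrsp : w.reg .rsp = addr g.R)
    (hrbp : w.reg .rbp = addr g.f) (hcode : CodeOK u₀ w.mem) (hinv : abiInv w) (hz : w.mem.u32 (g.R + 0x24) = 0)
    (hb : stb_vorbis.bytes_in_seg w.mem g.f = 0) : At9 u₀ g w :=
  ⟨A,
    { frame := frame_of hfr hm hrip hrsp hcode hinv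
      hand := hh
      rbp := hrbp
      sd := sd2_of_sdw1 hm.sd hno (CommentsOK.reblk hm.cm (fun B _ hB => up g A B hB)) hz
      own :=
        { comment := fun _ => hm.cm
          cb0 := fun h3 => absurd h3 (by omega)
          nonnull := fun h3 => absurd h3 (by omega)
          books := fun h5 => absurd h5 (by omega)
          floor := fun h6 => absurd h6 (by omega)
          residue := fun h7 => absurd h7 (by omega)
          mapping := fun h8 => absurd h8 (by omega) }
      bytes0 := hb }⟩

/-- **The exit `AtERR`** (0x113b22) after `error(f, VORBIS_invalid_setup)`: `Mid8`, eax = 0 ⇒ SD.ERR (`SDw.failed`; H1 is CM2). -/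
theorem atErr_of {u₀ : State} {g : Ghost} {A : Arena × List Obj} {v w : State} (hfr : Frame u₀ g pc_8 A v) (hh : g.Hand A)
    (hm : Mid8 g A w.mem) (hrip : w.rip = pc_ERR) (hrsp : w.reg .rsp = addr g.R) (hcode : CodeOK u₀ w.mem)
    (hinv : abiInv w) (hax : (w.reg .rax).toNat % 2 ^ 32 = 0) : AtERR u₀ g w := by
  have h1 : H1 (g.Blk A) w.mem g.f :=
    h1_of_cm2 (CommentsOK.CM2 (CommentsOK.reblk hm.cm (fun B _ hB => up g A B hB)))
  exact ⟨A, frame_of hfr hm hrip hrsp hcode hinv, hh, Or.inl ⟨hax, SDw.failed hm.sd (by omega) h1⟩⟩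

/-- **`Bits` over a stretch that writes nothing of `*f` but `[f + 136, f + 144)`** (`call error`: its stack, `f->error`). -/
theorem bits_other {Blk : Block → Prop} {len : Nat} {mem mem' : Mem} {f : Nat} {spans : List Span}
    (h : Bits Blk len mem f) (hs : Mem.SameExcept spans mem mem')
    (hd : ∀ w, w ∈ spans → w.hi ≤ f ∨ f + 1808 ≤ w.lo ∨ (f + 136 ≤ w.lo ∧ w.hi ≤ f + 144)) : Bits Blk len mem' f := by
  apply h.frame_fields
  apply Bits.SameFields.of_sameExcept hs
  all_goals
    intro w hw
    have := hd w hw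
    omega

/-- **The one footprint of every stretch of the segment**, over the registers of the function's entry state `e` (the form the
frame tactics read): the stack below the steady stack pointer, the spill slot `[R + 24H, R + 28H)`, the six windows of
get8_packet (which contain next_segment's, skip's and error's). -/
def Foot8 (e : State) : List Span :=
  [⟨(e.reg .rsp).toNat - 1888, (e.reg .rsp).toNat - 1480⟩,
   ⟨(e.reg .rsp).toNat - 1444, (e.reg .rsp).toNat - 1440⟩,
   ⟨(e.reg .rdi).toNat + 48, (e.reg .rdi).toNat + 56⟩, ⟨(e.reg .rdi).toNat + 84, (e.reg .rdi).toNat + 96⟩,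
   ⟨(e.reg .rdi).toNat + 136, (e.reg .rdi).toNat + 144⟩, ⟨(e.reg .rdi).toNat + 1484, (e.reg .rdi).toNat + 1749⟩,
   ⟨(e.reg .rdi).toNat + 1752, (e.reg .rdi).toNat + 1764⟩, ⟨(e.reg .rdi).toNat + 1768, (e.reg .rdi).toNat + 1784⟩]

/-- Every span of `Foot8` is `Allowed`. -/
theorem allowed_Foot8 {g : Ghost} (hgeo : Geo g) : ∀ s, s ∈ Foot8 g.e → Allowed g s := by
  intro s hs
  have hr := hgeo.r
  have e1 : g.RA = (g.e.reg .rsp).toNat := rfl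
  have e2 : g.f = (g.e.reg .rdi).toNat := rfl
  simp only [Foot8, List.mem_cons, List.mem_nil_iff, or_false] at hs
  unfold Allowed
  rcases hs with rfl | rfl | rfl | rfl | rfl | rfl | rfl | rfl <;> simp only [] <;> omega

/-- **`Mid8.step` over the footprint `Foot8`.** -/
theorem Mid8.stepFoot {g : Ghost} {A : Arena × List Obj} {mem mem' : Mem} (h : Mid8 g A mem) (hgeo : Geo g) (hh : g.Hand A)
    (hs : Mem.SameExcept (Foot8 g.e) mem mem') (hb : Bits (g.Blk A) g.len mem' g.f) : Mid8 g A mem' :=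
  h.step hgeo hh hs (allowed_Foot8 hgeo) hb

/-- **The shadow clause at a call of the segment**: the shadow layer of the last sync point (no shadow byte written since),
lowered to the callee's stack pointer. -/
theorem shadowPre_of {g : Ghost} {A : Arena × List Obj} {mem0 : Mem} {s : State} (hm : Mid8 g A mem0)
    (hoff : ∀ o, o ∈ A.2 → L.textHi ≤ o.base) (hun : ShadowUntouched mem0 s.mem)
    (hle : (s.reg .rsp).toNat + 8 ≤ g.R) (h8 : (s.reg .rsp).toNat % 8 = 0) (hlo : 0x700000 ≤ (s.reg .rsp).toNat + 8) :
    ShadowPre A.2 g.frames' s :=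
  ⟨(hm.shadow.untouched hun).lower hle (by omega) hlo, hoff⟩

/-- **The precondition of a packet reader at a call of the segment**: the shadow clause, `ReaderEnv` from the hand-over carrier,
`Bits` at the call. -/
theorem readerPre_of {g : Ghost} {A : Arena × List Obj} {mem0 : Mem} {s : State} (hm : Mid8 g A mem0) (hh : g.Hand A)
    (hoff : ∀ o, o ∈ A.2 → L.textHi ≤ o.base) (hun : ShadowUntouched mem0 s.mem)
    (hle : (s.reg .rsp).toNat + 8 ≤ g.R) (h8 : (s.reg .rsp).toNat % 8 = 0) (hlo : 0x700000 ≤ (s.reg .rsp).toNat + 8)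
    (hrdi : (s.reg .rdi).toNat = g.f) (hb : Bits (g.Blk A) g.len s.mem g.f) :
    ReaderPre A.2 g.frames' (g.Blk A) g.len s := by
  refine ⟨shadowPre_of hm hoff hun hle h8 hlo, ?_, ?_⟩
  · rw [hrdi]
    exact readerEnv hh hm.sd.env.live
  · rw [hrdi]
    exact hb

/-- `*f` inside ONE live object of the function's own object list (the callers' frames are active inside too). -/
theorem obj_live {g : Ghost} {A : Arena × List Obj} {mem : Mem} (hm : Mid8 g A mem) (hh : g.Hand A) :
    LiveIn A.2 g.frames' g.f Off.sizeof.stb_vorbis :=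
  (readerEnv hh hm.sd.env.live).obj

/-- **The store `f->bytes_in_seg = 0`** (0x11414e, 0x114179): `Bits` kept, μ not larger, the field reads 0. -/
theorem store_bytes0 {Blk : Block → Prop} {len : Nat} {mem : Mem} {f : Nat} (h : Bits Blk len mem f) :
    Bits Blk len (mem.writeLE (addr (f + 1748)) 1 0) f ∧ mu (mem.writeLE (addr (f + 1748)) 1 0) f ≤ mu mem f ∧
      stb_vorbis.bytes_in_seg (mem.writeLE (addr (f + 1748)) 1 0) f = 0 := by
  refine ⟨h.store_other 1748 1 0 (by omega) (by omega) (by omega) (by omega) (by omega), ?_, ?_⟩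
  · rw [h.mu_store_bytes_in_seg 0 (by omega), mu_def]
    exact muOf_set_B_zero _ _ _ _ _
  · simp only [vacc, voff]
    rw [Mem.u8_writeLE_same]

/-- A 32-bit argument whose register holds a number below 2^31 is not negative (`skip`'s `0 ≤ n`). -/
theorem argInt_nonneg (x : Word) (h : x.toNat < 2 ^ 31) : 0 ≤ argInt x := by
  rw [argInt_def]
  unfold sint32
  rw [Nat.mod_eq_of_lt (by omega)]
  split <;> omega

/-- `movzx esi, BYTE PTR […]`: the register holds a byte. -/
theorem movzx_byte_lt (n : Nat) : (Word.ofBV (BitVec.zeroExtend 32 (BitVec.ofNat 8 n))).toNat < 256 := by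
  unfold Word.ofBV
  simp only [UInt64.toNat_ofBitVec, BitVec.toNat_setWidth, BitVec.toNat_ofNat, BitVec.zeroExtend]
  omega

end Vorbis.Spec.start_decoder_8
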